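-- pv_equiv track=rewrite | github.com/posl/comment_recommendation | script/mod_gen/1_time/en/232_C/8.py | isSameShape
-- ===== SOURCE A (Python) =====
-- def isSameShape(N, M, A, B, C, D):
--     P = [0] * N
--     for i in range(N):
--         P[i] = i + 1
--     for i in range(N):
--         for j in range(N):
--             if A[i] == C[j]:
--                 if B[i] == D[j]:
--                     continue
--                 else:
--                     return False
--             elif A[i] == D[j]:
--                 if B[i] == C[j]:
--                     continue
--                 else:
--                     return False
--             elif B[i] == C[j]:
--                 if A[i] == D[j]:
--                     continue
--                 else:
--                     return False
--             elif B[i] == D[j]: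
--                 if A[i] == C[j]:
--                     continue
--                 else:
--                     return False
--             else:
--                 return False
--     return True
-- ===== SOURCE B (Python) =====
-- def isSameShape(N, M, A, B, C, D):
--     S = set()
--     for i in range(N):
--         S.add(frozenset((A[i], B[i])))
--         S.add(frozenset((C[i], D[i])))
--     return len(S) <= 1
-- ===== Notes on version B (the rewrite author's own statement) =====
-- stated objective: simpler
-- what changed: Replaces A's O(N^2) all-pairs branch-chain comparison with a single pass that collects each row's unordered edges {A[i],B[i]} and {C[i],D[i]} into a set and returns whether the set has at most one element.
-- outside the precondition, e.g. on isSameShape(2, 0, [1, 5], [2, 6], [3], [4]): A returns False, B raises IndexError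
import Mathlib
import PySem

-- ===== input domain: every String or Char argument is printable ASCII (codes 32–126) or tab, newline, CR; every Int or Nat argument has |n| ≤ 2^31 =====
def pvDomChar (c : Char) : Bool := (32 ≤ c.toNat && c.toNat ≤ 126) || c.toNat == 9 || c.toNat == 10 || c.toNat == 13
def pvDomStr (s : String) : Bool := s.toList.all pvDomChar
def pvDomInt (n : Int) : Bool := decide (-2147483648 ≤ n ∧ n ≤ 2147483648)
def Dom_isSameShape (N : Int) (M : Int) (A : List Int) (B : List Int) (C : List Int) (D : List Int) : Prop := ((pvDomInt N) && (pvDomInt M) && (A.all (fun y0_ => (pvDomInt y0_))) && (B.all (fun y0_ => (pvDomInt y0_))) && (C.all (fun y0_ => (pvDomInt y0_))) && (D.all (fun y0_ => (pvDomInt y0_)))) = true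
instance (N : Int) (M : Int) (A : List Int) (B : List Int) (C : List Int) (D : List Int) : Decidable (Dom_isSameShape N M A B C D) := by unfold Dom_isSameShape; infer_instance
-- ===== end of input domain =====

-- B replaces A's O(N^2) all-pairs branch chain by one pass collecting the unordered edges into a set
-- and checking it has at most one element (objective: simpler).

-- ===== PORT A =====
-- inner j-loop of A: early 'return False' propagates as the value false
def pvInner (ai bi : Int) (C D : List Int) : List Int → Bool
  | [] => true
  | j :: js =>
    if ai == PySem.List.pyGetD C j 0 then
      (if bi == PySem.List.pyGetD D j 0 then pvInner ai bi C D js else false)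
    else if ai == PySem.List.pyGetD D j 0 then
      (if bi == PySem.List.pyGetD C j 0 then pvInner ai bi C D js else false)
    else if bi == PySem.List.pyGetD C j 0 then
      (if ai == PySem.List.pyGetD D j 0 then pvInner ai bi C D js else false)
    else if bi == PySem.List.pyGetD D j 0 then
      (if ai == PySem.List.pyGetD C j 0 then pvInner ai bi C D js else false)
    else false

-- outer i-loop of A
def pvOuter (A B C D : List Int) (N : Int) : List Int → Bool
  | [] => true
  | i :: is =>
    if pvInner (PySem.List.pyGetD A i 0) (PySem.List.pyGetD B i 0) C D (PySem.List.pyRange 0 N 1)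
    then pvOuter A B C D N is else false

def isSameShape (N : Int) (M : Int) (A : List Int) (B : List Int) (C : List Int) (D : List Int) : Bool :=
  -- P = [0]*N; for i in range(N): P[i] = i + 1   (dead: P is never read afterwards)
  let _P := (PySem.List.pyRange 0 N 1).foldl (fun P i => PySem.List.pySetD P i (i + 1))
      (List.replicate N.toNat (0 : Int))
  pvOuter A B C D N (PySem.List.pyRange 0 N 1)

-- ===== PORT B =====
-- frozenset({x, y}) of two ints, modelled by its canonical (min, max) form — exact for
-- frozenset equality, which is equality of the two-element value sets
def pvEdge (x y : Int) : Int × Int := if x ≤ y then (x, y) else (y, x)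

def isSameShape_alt (N : Int) (M : Int) (A : List Int) (B : List Int) (C : List Int) (D : List Int) : Bool :=
  -- S = set(); for i in range(N): S.add(frozenset((A[i], B[i]))); S.add(frozenset((C[i], D[i])))
  decide (PySem.Set.len
    ((PySem.List.pyRange 0 N 1).foldl
      (fun S i =>
        PySem.Set.add
          (PySem.Set.add S (pvEdge (PySem.List.pyGetD A i 0) (PySem.List.pyGetD B i 0)))
          (pvEdge (PySem.List.pyGetD C i 0) (PySem.List.pyGetD D i 0)))
      PySem.Set.empty) ≤ 1)

-- ===== PRECONDITION & SPEC =====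
-- Pre_ excludes inputs where some list is shorter than N: there the Pythons hit IndexError
-- (A may still return False early when an edge mismatch occurs before the first out-of-range
-- access, while B's full pass raises; those early-False inputs are excluded too).
def Pre_isSameShape (N : Int) (M : Int) (A : List Int) (B : List Int) (C : List Int) (D : List Int) : Prop :=
  N ≤ (A.length : Int) ∧ N ≤ (B.length : Int) ∧ N ≤ (C.length : Int) ∧ N ≤ (D.length : Int)
instance (N : Int) (M : Int) (A : List Int) (B : List Int) (C : List Int) (D : List Int) : Decidable (Pre_isSameShape N M A B C D) := by unfold Pre_isSameShape; infer_instance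

def pvWitness_isSameShape : Int × Int × List Int × List Int × List Int × List Int :=
  (2, 0, [1, 2], [2, 1], [2, 1], [1, 2])

def Spec_isSameShape (N : Int) (M : Int) (A : List Int) (B : List Int) (C : List Int) (D : List Int) (out : Bool) : Prop := out = isSameShape_alt N M A B C D
instance (N : Int) (M : Int) (A : List Int) (B : List Int) (C : List Int) (D : List Int) (out : Bool) : Decidable (Spec_isSameShape N M A B C D out) := by unfold Spec_isSameShape; infer_instance

-- ===== CLAIM (what is proved, stated in full; the proofs are below) =====
def Claim_equal_isSameShape : Prop := ∀ (N : Int) (M : Int) (A : List Int) (B : List Int) (C : List Int) (D : List Int), Dom_isSameShape N M A B C D → Pre_isSameShape N M A B C D → Spec_isSameShape N M A B C D (isSameShape N M A B C D)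

-- ===== LEMMAS AND PROOFS =====

theorem pvEdge_eq_iff (a b c d : Int) :
    pvEdge a b = pvEdge c d ↔ (a = c ∧ b = d) ∨ (a = d ∧ b = c) := by
  unfold pvEdge
  split_ifs <;> simp [Prod.ext_iff] <;> omega

theorem pvChain_eq (a b c d : Int) (k : Bool) :
    (if a == c then (if b == d then k else false)
     else if a == d then (if b == c then k else false)
     else if b == c then (if a == d then k else false)
     else if b == d then (if a == c then k else false)
     else false)
    = ((pvEdge a b == pvEdge c d) && k) := by
  by_cases h : pvEdge a b = pvEdge c d
  · rcases (pvEdge_eq_iff a b c d).mp h with ⟨h1, h2⟩ | ⟨h1, h2⟩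
    · subst h1; subst h2; simp
    · subst h1; subst h2
      by_cases hab : a = b <;> simp [hab, h]
  · have hd : ¬ ((a = c ∧ b = d) ∨ (a = d ∧ b = c)) :=
      fun hc => h ((pvEdge_eq_iff a b c d).mpr hc)
    have hf : (pvEdge a b == pvEdge c d) = false := by
      simp [beq_eq_false_iff_ne, h]
    rw [hf, Bool.false_and]
    split_ifs <;> simp_all

theorem pvInner_eq_all (a b : Int) (C D : List Int) (js : List Int) :
    pvInner a b C D js
      = js.all (fun j => pvEdge a b == pvEdge (PySem.List.pyGetD C j 0) (PySem.List.pyGetD D j 0)) := by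
  induction js with
  | nil => rfl
  | cons j js ih =>
    rw [List.all_cons, ← ih, show pvInner a b C D (j :: js) =
      (if a == PySem.List.pyGetD C j 0 then
        (if b == PySem.List.pyGetD D j 0 then pvInner a b C D js else false)
      else if a == PySem.List.pyGetD D j 0 then
        (if b == PySem.List.pyGetD C j 0 then pvInner a b C D js else false)
      else if b == PySem.List.pyGetD C j 0 then
        (if a == PySem.List.pyGetD D j 0 then pvInner a b C D js else false)
      else if b == PySem.List.pyGetD D j 0 then
        (if a == PySem.List.pyGetD C j 0 then pvInner a b C D js else false)
      else false) from rfl, pvChain_eq]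

theorem pvOuter_eq_all (A B C D : List Int) (N : Int) (is : List Int) :
    pvOuter A B C D N is
      = is.all (fun i =>
          pvInner (PySem.List.pyGetD A i 0) (PySem.List.pyGetD B i 0) C D (PySem.List.pyRange 0 N 1)) := by
  induction is with
  | nil => rfl
  | cons i is ih =>
    rw [List.all_cons, ← ih, show pvOuter A B C D N (i :: is) =
      (if pvInner (PySem.List.pyGetD A i 0) (PySem.List.pyGetD B i 0) C D (PySem.List.pyRange 0 N 1)
       then pvOuter A B C D N is else false) from rfl]
    cases pvInner (PySem.List.pyGetD A i 0) (PySem.List.pyGetD B i 0) C D (PySem.List.pyRange 0 N 1) <;> simp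

theorem pvFoldl_add2 (f g : Int → Int × Int) (l : List Int) (s : PySem.Set (Int × Int)) :
    l.foldl (fun S i => PySem.Set.add (PySem.Set.add S (f i)) (g i)) s
      = PySem.Set.update s (l.flatMap (fun i => [f i, g i])) := by
  induction l generalizing s with
  | nil => simp [PySem.Set.update_nil]
  | cons i l ih =>
    rw [List.foldl_cons, ih, List.flatMap_cons,
        show ([f i, g i] : List (Int × Int)) ++ l.flatMap (fun i => [f i, g i])
          = f i :: g i :: l.flatMap (fun i => [f i, g i]) from rfl,
        PySem.Set.update_cons, PySem.Set.update_cons]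

theorem pvOfList_len_le_one_iff (L : List (Int × Int)) :
    PySem.Set.len (PySem.Set.ofList L) ≤ 1 ↔ ∀ x ∈ L, ∀ y ∈ L, x = y := by
  constructor
  · intro h x hx y hy
    have hx' : x ∈ PySem.Set.ofList L := (PySem.Set.mem_ofList _ _).mpr hx
    have hy' : y ∈ PySem.Set.ofList L := (PySem.Set.mem_ofList _ _).mpr hy
    rcases e : PySem.Set.ofList L with _ | ⟨a, _ | ⟨b, t⟩⟩
    · rw [e] at hx'; exact absurd hx' (by simp)
    · rw [e] at hx' hy'
      simp at hx' hy'; rw [hx', hy']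
    · exfalso
      unfold PySem.Set.len at h
      rw [e] at h
      simp at h
      omega
  · intro h
    cases L with
    | nil => simp [PySem.Set.ofList_nil, PySem.Set.len]
    | cons x L =>
      rw [PySem.Set.ofList_cons]
      have hd : PySem.Set.discard (PySem.Set.ofList L) x = [] := by
        rw [List.eq_nil_iff_forall_not_mem]
        intro y hy
        rw [PySem.Set.mem_discard] at hy
        exact hy.2 (h y (List.mem_cons_of_mem _ ((PySem.Set.mem_ofList _ _).mp hy.1)) x (List.mem_cons_self ..))
      rw [hd]
      simp [PySem.Set.len]

theorem pvBridge (R : List Int) (e1 e2 : Int → Int × Int) :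
    (R.all fun i => R.all fun j => e1 i == e2 j)
      = decide (PySem.Set.len (PySem.Set.ofList (R.flatMap fun i => [e1 i, e2 i])) ≤ 1) := by
  rw [Bool.eq_iff_iff]
  simp only [List.all_eq_true, beq_iff_eq, decide_eq_true_eq]
  rw [pvOfList_len_le_one_iff]
  constructor
  · intro h x hx y hy
    rcases List.mem_flatMap.mp hx with ⟨i, hi, hxi⟩
    rcases List.mem_flatMap.mp hy with ⟨j, hj, hyj⟩
    simp only [List.mem_cons, List.not_mem_nil, or_false] at hxi hyj
    rcases hxi with rfl | rfl <;> rcases hyj with rfl | rfl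
    · rw [h i hi j hj, ← h j hj j hj]
    · exact h i hi j hj
    · rw [← h j hj i hi, h j hj j hj]
    · rw [← h i hi i hi, h i hi j hj]
  · intro h i hi j hj
    exact h (e1 i) (List.mem_flatMap.mpr ⟨i, hi, List.mem_cons_self ..⟩)
      (e2 j) (List.mem_flatMap.mpr ⟨j, hj, List.mem_cons_of_mem _ (List.mem_cons_self ..)⟩)

-- ===== VERDICT (by name: the statement is the Claim_ definition above) =====
theorem isSameShape_spec : Claim_equal_isSameShape := by
  intro N M A B C D _ _
  unfold Spec_isSameShape isSameShape isSameShape_alt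
  rw [pvOuter_eq_all, pvFoldl_add2, PySem.Set.update_empty]
  simp only [pvInner_eq_all]
  exact pvBridge (PySem.List.pyRange 0 N 1)
    (fun i => pvEdge (PySem.List.pyGetD A i 0) (PySem.List.pyGetD B i 0))
    (fun j => pvEdge (PySem.List.pyGetD C j 0) (PySem.List.pyGetD D j 0))
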